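-- pv_equiv track=rewrite | github.com/pirsqed/email_extractor | emailextractor.py | getKeysForCSV
-- ===== SOURCE A (Python) =====
-- def getKeysForCSV(lines):
-- 	line = lines[0]
-- 	keys = line.keys()
-- 	potentialEmailKeys = ['email', 'e-mail', 'e mail']
-- 	potentialNameKeys = ['name', 'first name', 'fname']
-- 	emailKey = None
-- 	nameKey = None
-- 	for key in keys:
-- 		keyLower = key.lower()
-- 		if keyLower in potentialEmailKeys and emailKey == None:
-- 			emailKey = key
-- 			continue
-- 		if keyLower in potentialNameKeys and nameKey == None:
-- 			nameKey = key
-- 			continue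
--
-- 	return nameKey, emailKey
-- ===== SOURCE B (Python) =====
-- def getKeysForCSV(lines):
--     potentialEmailKeys = ['email', 'e-mail', 'e mail']
--     potentialNameKeys = ['name', 'first name', 'fname']
--     keys = lines[0].keys()
--     emailKey = next((k for k in keys if k.lower() in potentialEmailKeys), None)
--     nameKey = next((k for k in keys if k.lower() in potentialNameKeys), None)
--     return nameKey, emailKey
-- ===== Notes on version B (the rewrite author's own statement) =====
-- stated objective: simpler
-- what changed: Replaces the single loop threading two mutable accumulators (with continue and None-guards) by two independent first-match searches over the keys, one per constant list.
import Mathlib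
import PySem

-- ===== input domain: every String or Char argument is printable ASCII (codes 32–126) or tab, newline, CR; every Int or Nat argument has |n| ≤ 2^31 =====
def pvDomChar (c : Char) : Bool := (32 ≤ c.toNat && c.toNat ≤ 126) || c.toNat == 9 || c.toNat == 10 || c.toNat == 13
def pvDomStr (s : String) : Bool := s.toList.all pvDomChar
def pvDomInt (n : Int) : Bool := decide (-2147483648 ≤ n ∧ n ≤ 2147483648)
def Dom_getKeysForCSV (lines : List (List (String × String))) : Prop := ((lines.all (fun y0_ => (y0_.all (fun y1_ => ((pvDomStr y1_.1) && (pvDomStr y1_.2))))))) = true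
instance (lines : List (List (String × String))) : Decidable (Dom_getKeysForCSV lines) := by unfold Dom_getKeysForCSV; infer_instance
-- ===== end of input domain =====

-- B replaces A's single loop threading two mutable accumulators by two independent
-- first-match searches over the keys (objective: simpler). Equivalence on Pre_ (nonempty input).

-- ===== PORT A =====
-- the dict's keys: first occurrences of the pairs' first components, in order
def getKeysForCSV (lines : List (List (String × String))) : Option String × Option String :=
  match lines with
  | [] => (none, none)   -- Python raises IndexError here; excluded by Pre_
  | line :: _ =>
    let keys := PySem.List.dedup (line.map Prod.fst)
    let potentialEmailKeys : List String := ["email", "e-mail", "e mail"]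
    let potentialNameKeys : List String := ["name", "first name", "fname"]
    let st := keys.foldl (fun (st : Option String × Option String) key =>
      let keyLower := PySem.Str.lower key
      if potentialEmailKeys.contains keyLower && st.1 == none then (some key, st.2)
      else if potentialNameKeys.contains keyLower && st.2 == none then (st.1, some key)
      else st) (none, none)
    (st.2, st.1)

-- ===== PORT B =====
def getKeysForCSV_alt (lines : List (List (String × String))) : Option String × Option String :=
  match lines with
  | [] => (none, none)   -- Python raises IndexError here; excluded by Pre_
  | line :: _ =>
    let keys := PySem.List.dedup (line.map Prod.fst)
    let emailKey := keys.find? (fun k => (["email", "e-mail", "e mail"] : List String).contains (PySem.Str.lower k))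
    let nameKey := keys.find? (fun k => (["name", "first name", "fname"] : List String).contains (PySem.Str.lower k))
    (nameKey, emailKey)

-- ===== PRECONDITION & SPEC =====
-- A does lines[0] and raises IndexError on the empty list; Pre_ excludes exactly that.
def Pre_getKeysForCSV (lines : List (List (String × String))) : Prop := lines ≠ []
instance (lines : List (List (String × String))) : Decidable (Pre_getKeysForCSV lines) := by unfold Pre_getKeysForCSV; infer_instance
def pvWitness_getKeysForCSV : (List (List (String × String))) := [[("Name", "a"), ("E-Mail", "b")]]

def Spec_getKeysForCSV (lines : List (List (String × String))) (out : Option String × Option String) : Prop := out = getKeysForCSV_alt lines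
instance (lines : List (List (String × String))) (out : Option String × Option String) : Decidable (Spec_getKeysForCSV lines out) := by unfold Spec_getKeysForCSV; infer_instance

-- ===== CLAIM (what is proved, stated in full; the proofs are below) =====
def Claim_equal_getKeysForCSV : Prop := ∀ (lines : List (List (String × String))), Dom_getKeysForCSV lines → Pre_getKeysForCSV lines → Spec_getKeysForCSV lines (getKeysForCSV lines)

-- ===== LEMMAS AND PROOFS =====

-- the body of A's loop, named so the induction can rewrite one step at a time
def pvStep (pE pN : String → Bool) (st : Option String × Option String) (key : String) :
    Option String × Option String :=
  if pE key && st.1 == none then (some key, st.2)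
  else if pN key && st.2 == none then (st.1, some key)
  else st

-- A's loop with two None-guarded accumulators computes, in each component,
-- the first key matching that component's predicate — provided the predicates are disjoint.
lemma pvFoldlTwo (pE pN : String → Bool) (hd : ∀ k, pE k = true → pN k = false)
    (ks : List String) (e0 n0 : Option String) :
    ks.foldl (pvStep pE pN) (e0, n0)
    = (e0.or (ks.find? pE), n0.or (ks.find? pN)) := by
  induction ks generalizing e0 n0 with
  | nil => simp
  | cons k ks ih =>
    by_cases hE : pE k = true
    · have hN := hd k hE
      cases e0 with
      | none =>
        rw [List.foldl_cons, show pvStep pE pN (none, n0) k = (some k, n0) by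
          simp [pvStep, hE], ih]
        simp [List.find?, hE, hN]
      | some x =>
        rw [List.foldl_cons, show pvStep pE pN (some x, n0) k = (some x, n0) by
          simp [pvStep, hE, hN], ih]
        simp [List.find?, hN]
    · by_cases hN : pN k = true
      · cases n0 with
        | none =>
          rw [List.foldl_cons, show pvStep pE pN (e0, none) k = (e0, some k) by
            simp [pvStep, hE, hN], ih]
          simp [List.find?, hE, hN]
        | some x =>
          rw [List.foldl_cons, show pvStep pE pN (e0, some x) k = (e0, some x) by
            simp [pvStep, hE, hN], ih]
          simp [List.find?, hE]
      · rw [List.foldl_cons, show pvStep pE pN (e0, n0) k = (e0, n0) by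
          simp [pvStep, hE, hN], ih]
        simp [List.find?, hE, hN]

lemma pvDisjoint (k : String) :
    (["email", "e-mail", "e mail"] : List String).contains (PySem.Str.lower k) = true →
    (["name", "first name", "fname"] : List String).contains (PySem.Str.lower k) = false := by
  intro h
  have h' : PySem.Str.lower k = "email" ∨ PySem.Str.lower k = "e-mail" ∨
      PySem.Str.lower k = "e mail" := by simpa using h
  rcases h' with h' | h' | h' <;> simp [h']

-- ===== VERDICT (by name: the statement is the Claim_ definition above) =====
theorem getKeysForCSV_spec : Claim_equal_getKeysForCSV := by
  intro lines _ hpre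
  unfold Spec_getKeysForCSV getKeysForCSV getKeysForCSV_alt
  cases lines with
  | nil => exact absurd rfl hpre
  | cons line rest =>
    simp only
    rw [show (fun (st : Option String × Option String) key =>
      let keyLower := PySem.Str.lower key
      if (["email", "e-mail", "e mail"] : List String).contains keyLower && st.1 == none then (some key, st.2)
      else if (["name", "first name", "fname"] : List String).contains keyLower && st.2 == none then (st.1, some key)
      else st) = pvStep (fun k => (["email", "e-mail", "e mail"] : List String).contains (PySem.Str.lower k))
        (fun k => (["name", "first name", "fname"] : List String).contains (PySem.Str.lower k)) from rfl]
    rw [pvFoldlTwo (fun k => (["email", "e-mail", "e mail"] : List String).contains (PySem.Str.lower k))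
        (fun k => (["name", "first name", "fname"] : List String).contains (PySem.Str.lower k))
        (fun k => pvDisjoint k)]
    simp
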